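-- pv_equiv track=rewrite | github.com/minimav/advent_of_code | 2024/puzzle_21/puzzle.py | hop_shortest_routes
-- ===== SOURCE A (Python) =====
-- def hop_shortest_routes(
--     all_shortest_routes: dict[str, list[str]], target: str
-- ) -> list[str]:
--     current = "A"
--     routes = [""]
--     for char in target:
--         shortest_routes = all_shortest_routes[current, char]
--
--         new_routes = []
--         for route in routes:
--             for shortest_route in shortest_routes:
--                 # Include press of digit
--                 new_routes.append(route + shortest_route + "A")
--         routes = new_routes
--         current = char
--     return routes
-- ===== SOURCE B (Python) =====
-- def hop_shortest_routes(all_shortest_routes, target):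
--     # Precompute, per position, the option strings (route + trailing "A"),
--     # then enumerate the Cartesian product recursively from the front.
--     current = "A"
--     options = []
--     for char in target:
--         options.append([sr + "A" for sr in all_shortest_routes[current, char]])
--         current = char
--
--     def combos(i):
--         if i == len(options):
--             return [""]
--         return [opt + rest for opt in options[i] for rest in combos(i + 1)]
--
--     return combos(0)
-- ===== Notes on version B (the rewrite author's own statement) =====
-- stated objective: alternative
-- what changed: B first builds a per-character table of option strings (each shortest route with the trailing 'A' folded in) in one pass, then enumerates the Cartesian product by recursion on that table, instead of A's single loop that incrementally extends an accumulator of partial routes.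
import Mathlib
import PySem

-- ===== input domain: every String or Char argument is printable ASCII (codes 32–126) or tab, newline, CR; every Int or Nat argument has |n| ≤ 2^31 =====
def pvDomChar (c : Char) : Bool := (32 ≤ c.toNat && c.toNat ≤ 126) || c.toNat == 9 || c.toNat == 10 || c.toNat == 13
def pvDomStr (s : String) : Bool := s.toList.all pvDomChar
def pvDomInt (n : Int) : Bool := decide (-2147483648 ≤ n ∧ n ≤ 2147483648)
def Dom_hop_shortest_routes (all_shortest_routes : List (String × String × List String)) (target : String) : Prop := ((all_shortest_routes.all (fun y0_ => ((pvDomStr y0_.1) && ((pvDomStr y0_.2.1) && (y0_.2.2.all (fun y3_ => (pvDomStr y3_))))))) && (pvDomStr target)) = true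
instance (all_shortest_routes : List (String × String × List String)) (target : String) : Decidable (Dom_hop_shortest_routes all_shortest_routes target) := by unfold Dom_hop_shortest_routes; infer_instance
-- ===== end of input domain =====

-- B builds the per-character option table first, then takes its Cartesian product by recursion, instead of A's incremental accumulator loop.
-- ===== PORT A =====
-- first entry whose key pair matches (cur, c); none = Python KeyError
def lookupKey (d : List (String × String × List String)) (cur c : Char) : Option (List String) :=
  (d.find? (fun e => e.1 == String.singleton cur && e.2.1 == String.singleton c)).map (fun e => e.2.2)

def goA (d : List (String × String × List String)) : Char → List String → List Char → List String
  | _, routes, [] => routes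
  | cur, routes, c :: rest =>
    match lookupKey d cur c with
    | none => []  -- Python raises KeyError here; excluded by Pre_
    | some srs =>
      goA d c (routes.foldl (fun acc r => srs.foldl (fun acc2 sr => acc2 ++ [r ++ sr ++ "A"]) acc) []) rest

def hop_shortest_routes (all_shortest_routes : List (String × String × List String)) (target : String) : List String :=
  goA all_shortest_routes 'A' [""] target.toList

-- ===== PORT B =====
def optionsB (d : List (String × String × List String)) : Char → List Char → Option (List (List String))
  | _, [] => some []
  | cur, c :: rest =>
    match lookupKey d cur c with
    | none => none  -- Python raises KeyError here; excluded by Pre_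
    | some srs => (optionsB d c rest).map (fun os => srs.map (fun sr => sr ++ "A") :: os)

def combosB : List (List String) → List String
  | [] => [""]
  | opts :: rest => opts.flatMap (fun o => (combosB rest).map (fun r => o ++ r))

def hop_shortest_routes_alt (all_shortest_routes : List (String × String × List String)) (target : String) : List String :=
  match optionsB all_shortest_routes 'A' target.toList with
  | none => []
  | some os => combosB os

-- ===== PRECONDITION =====
-- Pre_ excludes exactly the inputs on which Python A raises KeyError: some consecutive
-- (previous char, char) key pair along the target walk is absent from the dict.
def Pre_hop_shortest_routes (all_shortest_routes : List (String × String × List String)) (target : String) : Prop :=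
  ((List.zip ('A' :: target.toList) target.toList).all (fun pc =>
    all_shortest_routes.any (fun e => e.1 == String.singleton pc.1 && e.2.1 == String.singleton pc.2))) = true

instance (all_shortest_routes : List (String × String × List String)) (target : String) : Decidable (Pre_hop_shortest_routes all_shortest_routes target) := by unfold Pre_hop_shortest_routes; infer_instance

def pvWitness_hop_shortest_routes : (List (String × String × List String)) × String :=
  ([("A", "1", ["<", "^"]), ("1", "2", [">"])], "12")

-- ===== PRECONDITION & SPEC =====
def Spec_hop_shortest_routes (all_shortest_routes : List (String × String × List String)) (target : String) (out : List String) : Prop := out = hop_shortest_routes_alt all_shortest_routes target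
instance (all_shortest_routes : List (String × String × List String)) (target : String) (out : List String) : Decidable (Spec_hop_shortest_routes all_shortest_routes target out) := by unfold Spec_hop_shortest_routes; infer_instance

-- ===== CLAIM (what is proved, stated in full; the proofs are below) =====
def Claim_equal_hop_shortest_routes : Prop := ∀ (all_shortest_routes : List (String × String × List String)) (target : String), Dom_hop_shortest_routes all_shortest_routes target → Pre_hop_shortest_routes all_shortest_routes target → Spec_hop_shortest_routes all_shortest_routes target (hop_shortest_routes all_shortest_routes target)

-- ===== LEMMAS AND PROOFS =====

theorem newroutes_eq (srs routes : List String) :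
    routes.foldl (fun acc r => srs.foldl (fun acc2 sr => acc2 ++ [r ++ sr ++ "A"]) acc) [] =
      routes.flatMap (fun r => srs.map (fun sr => r ++ sr ++ "A")) := by
  simp only [PySem.List.foldl_append_singleton_eq_map, PySem.List.foldl_append_eq_flatMap,
    List.nil_append, List.flatMap]

theorem goA_eq (d : List (String × String × List String)) :
    ∀ (cs : List Char) (cur : Char) (routes : List String),
      goA d cur routes cs =
        match optionsB d cur cs with
        | none => []
        | some os => routes.flatMap (fun r => (combosB os).map (fun s => r ++ s)) := by
  intro cs
  induction cs with
  | nil => intro cur routes; simp [goA, optionsB, combosB]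
  | cons c rest ih =>
    intro cur routes
    simp only [goA, optionsB]
    cases h : lookupKey d cur c with
    | none => simp
    | some srs =>
      simp only [Option.map]
      rw [ih c, newroutes_eq]
      cases optionsB d c rest with
      | none => simp
      | some os =>
        simp [combosB, List.flatMap_map, List.map_flatMap, List.flatMap_assoc,
          Function.comp_def, String.append_assoc]

-- ===== VERDICT (by name: the statement is the Claim_ definition above) =====
theorem hop_shortest_routes_spec : Claim_equal_hop_shortest_routes := by
  intro d target _ _
  unfold Spec_hop_shortest_routes hop_shortest_routes hop_shortest_routes_alt
  rw [goA_eq]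
  cases optionsB d 'A' target.toList with
  | none => rfl
  | some os => simp
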